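-- pv_equiv track=rewrite | github.com/darrinmc1/TICU.TV | scripts/tts-pipeline.py | find_quoted_spans
-- ===== SOURCE A (Python) =====
-- def find_quoted_spans(text: str) -> list[tuple[int, int]]:
--     """Find all quoted dialogue spans in text."""
--     spans = []
--     i = 0
--     while i < len(text):
--         if text[i] == '"':
--             # Find closing quote
--             j = text.find('"', i + 1)
--             if j == -1:
--                 break
--             spans.append((i, j + 1))
--             i = j + 1
--         else:
--             i += 1
--     return spans
-- ===== SOURCE B (Python) =====
-- def find_quoted_spans(text: str) -> list[tuple[int, int]]:
--     """Find all quoted dialogue spans in text."""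
--     positions = [i for i, c in enumerate(text) if c == '"']
--     it = iter(positions)
--     return [(a, b + 1) for a, b in zip(it, it)]
-- ===== Notes on version B (the rewrite author's own statement) =====
-- stated objective: idiomatic
-- what changed: Replaces the index-jumping while/find scan with one comprehension collecting all quote positions and zip(it, it) pairing consecutive ones (an odd trailing quote is dropped by zip exactly as A's break drops it); the single comprehension pass avoids A's per-character interpreted loop.
import Mathlib
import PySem

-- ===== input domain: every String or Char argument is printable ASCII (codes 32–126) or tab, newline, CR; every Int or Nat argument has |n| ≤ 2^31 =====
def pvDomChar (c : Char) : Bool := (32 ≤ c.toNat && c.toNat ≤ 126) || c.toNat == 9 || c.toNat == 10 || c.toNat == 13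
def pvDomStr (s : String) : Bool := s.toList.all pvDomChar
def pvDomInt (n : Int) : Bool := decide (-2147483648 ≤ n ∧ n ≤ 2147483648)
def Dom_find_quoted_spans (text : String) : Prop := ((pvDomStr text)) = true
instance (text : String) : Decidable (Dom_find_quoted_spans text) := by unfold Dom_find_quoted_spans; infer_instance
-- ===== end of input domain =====

-- B replaces A's index-jumping while/find scan by one pass collecting all quote
-- positions and pairing consecutive ones (idiomatic; same return value everywhere).

-- ===== PORT A =====
-- A's while loop over index i, ported on text.toList; 'text.find('"', i+1)' is
-- PySem.Chars.findFrom (exact).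
def findQuotedLoop (cs : List Char) (i : Nat) (spans : List (Int × Int)) :
    List (Int × Int) :=
  if h : i < cs.length then
    if cs[i] = '"' then
      let j := PySem.Chars.findFrom cs ['"'] ((i : Int) + 1) none
      if hj : j = -1 then spans
      else
        findQuotedLoop cs (j.toNat + 1) (spans ++ [((i : Int), j + 1)])
    else findQuotedLoop cs (i + 1) spans
  else spans
termination_by cs.length - i
decreasing_by
  · have hk : i + 1 ≤ cs.length := h
    have hs := PySem.Chars.findFrom_natCast_spec cs ['"'] (i + 1) hk
      (by push_cast; exact hj)
    have hcast : ((i + 1 : Nat) : Int) = (i : Int) + 1 := by push_cast; ring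
    rw [hcast] at hs
    obtain ⟨h1, hpre, -⟩ := hs
    have h2 := hpre.length_le
    simp [List.length_drop] at h2
    omega
  · omega

def find_quoted_spans (text : String) : List (Int × Int) :=
  findQuotedLoop text.toList 0 []

-- ===== PORT B =====
-- 'zip(it, it)' over one iterator consumes the positions in consecutive pairs:
-- ported as the pair-consuming recursion below (exact; an odd leftover is dropped).
def pairUp : List Int → List (Int × Int)
  | a :: b :: t => (a, b + 1) :: pairUp t
  | _ => []


def find_quoted_spans_alt (text : String) : List (Int × Int) :=
  pairUp (((PySem.List.enumerate text.toList 0).filter (fun p => p.2 = '"')).map (·.1))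

-- ===== PRECONDITION & SPEC =====
def Spec_find_quoted_spans (text : String) (out : List (Int × Int)) : Prop :=
  out = find_quoted_spans_alt text
instance (text : String) (out : List (Int × Int)) :
    Decidable (Spec_find_quoted_spans text out) := by
  unfold Spec_find_quoted_spans; infer_instance

-- ===== CLAIM =====
def Claim_equal_find_quoted_spans : Prop :=
  ∀ (text : String), Dom_find_quoted_spans text →
    Spec_find_quoted_spans text (find_quoted_spans text)

-- ===== LEMMAS AND PROOFS =====

lemma pairUp_nil : pairUp [] = [] := rfl
lemma pairUp_single (a : Int) : pairUp [a] = [] := rfl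
lemma pairUp_cons_cons (a b : Int) (t : List Int) :
    pairUp (a :: b :: t) = (a, b + 1) :: pairUp t := rfl

/-- The quote positions of `cs` counted from start index `s`. -/
def qposL : List Char → Int → List Int
  | [], _ => []
  | c :: t, s => if c = '"' then s :: qposL t (s + 1) else qposL t (s + 1)

lemma enumerate_filter_eq_qposL (cs : List Char) (s : Int) :
    ((PySem.List.enumerate cs s).filter (fun p => p.2 = '"')).map (·.1) = qposL cs s := by
  induction cs generalizing s with
  | nil => simp [qposL, PySem.List.enumerate_nil]
  | cons c t ih =>
    rw [PySem.List.enumerate_cons]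
    by_cases hc : c = '"' <;> simp [qposL, hc, ih]

lemma qposL_eq_nil_iff (l : List Char) (s : Int) : qposL l s = [] ↔ '"' ∉ l := by
  induction l generalizing s with
  | nil => simp [qposL]
  | cons c t ih =>
    rw [qposL]
    by_cases hc : c = '"'
    · simp [hc]
    · have hc' : ¬('"' = c) := fun h => hc h.symm
      simp [hc, ih, hc']

lemma singleton_prefix_drop_iff (cs : List Char) (m : Nat) (c : Char) :
    [c] <+: cs.drop m ↔ cs[m]? = some c := by
  rw [← List.head?_drop]
  cases cs.drop m with
  | nil => simp
  | cons a t => simp [List.cons_prefix_cons, eq_comm]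

lemma singleton_infix_iff_mem (l : List Char) (c : Char) : [c] <:+: l ↔ c ∈ l := by
  constructor
  · rintro ⟨u, v, rfl⟩; simp
  · intro h
    obtain ⟨u, v, rfl⟩ := List.mem_iff_append.mp h
    exact ⟨u, v, by simp⟩

lemma drop_eq_cons (cs : List Char) (i : Nat) (h : i < cs.length) :
    cs.drop i = cs[i] :: cs.drop (i + 1) :=
  List.drop_eq_getElem_cons h

lemma qposL_head (cs : List Char) (t jn : Nat) (hjn : jn < cs.length)
    (ht : t ≤ jn) (hq : cs[jn] = '"')
    (hno : ∀ m (_hm1 : t ≤ m) (hm2 : m < jn), cs[m]'(by omega) ≠ '"') :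
    qposL (cs.drop t) t = (jn : Int) :: qposL (cs.drop (jn + 1)) (jn + 1) := by
  induction hd : jn - t generalizing t with
  | zero =>
    have : t = jn := by omega
    subst this
    rw [drop_eq_cons cs t hjn, qposL, if_pos hq]
  | succ n ih =>
    have htl : t < cs.length := by omega
    rw [drop_eq_cons cs t htl, qposL,
      if_neg (hno t le_rfl (by omega)), ← Int.natCast_succ]
    exact ih (t + 1) (by omega) (fun m hm1 hm2 => hno m (by omega) hm2) (by omega)

lemma findQuotedLoop_eq (cs : List Char) (i : Nat) (spans : List (Int × Int))
    (hi : i ≤ cs.length) :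
    findQuotedLoop cs i spans = spans ++ pairUp (qposL (cs.drop i) i) := by
  induction hd : cs.length - i using Nat.strong_induction_on generalizing i spans with
  | _ n ih =>
  rw [findQuotedLoop]
  by_cases h : i < cs.length
  · rw [dif_pos h]
    by_cases hc : cs[i] = '"'
    · rw [if_pos hc]
      have hk : i + 1 ≤ cs.length := h
      by_cases hj : PySem.Chars.findFrom cs ['"'] ((i : Int) + 1) none = -1
      · rw [dif_pos hj]
        have hfj : PySem.Chars.findFrom cs ['"'] (((i + 1 : Nat) : Int)) none = -1 := by
          push_cast; exact hj
        have hni := (PySem.Chars.findFrom_natCast_eq_neg_one_iff cs ['"'] (i + 1) hk).mp hfj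
        have hempty : qposL (cs.drop (i + 1)) ((i : Int) + 1) = [] := by
          rw [qposL_eq_nil_iff]
          intro hmem
          exact hni ((singleton_infix_iff_mem _ _).mpr hmem)
        rw [drop_eq_cons cs i h, qposL, if_pos hc, hempty, pairUp_single]
        simp
      · rw [dif_neg hj]
        set j := PySem.Chars.findFrom cs ['"'] ((i : Int) + 1) none with hjdef
        have hfj : PySem.Chars.findFrom cs ['"'] (((i + 1 : Nat) : Int)) none = j := by
          push_cast; rfl
        have hs := PySem.Chars.findFrom_natCast_spec cs ['"'] (i + 1) hk
          (by rw [hfj]; exact hj)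
        rw [hfj] at hs
        obtain ⟨hle, hpre, hmin⟩ := hs
        have hjn : j.toNat < cs.length := by
          have := hpre.length_le
          simp [List.length_drop] at this
          omega
        have hq : cs[j.toNat] = '"' := by
          have := (singleton_prefix_drop_iff cs j.toNat '"').mp hpre
          simpa [List.getElem?_eq_getElem hjn] using this
        have hcast : ((j.toNat : Nat) : Int) = j := by omega
        have hhead : qposL (cs.drop (i + 1)) ((i : Int) + 1) =
            ((j.toNat : Nat) : Int) :: qposL (cs.drop (j.toNat + 1)) ((j.toNat : Nat) + 1) := by
          have := qposL_head cs (i + 1) j.toNat hjn (by omega) hq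
            (fun m hm1 hm2 => by
              intro hcm
              exact hmin m (by omega) hm2
                ((singleton_prefix_drop_iff cs m '"').mpr
                  (by simp [List.getElem?_eq_getElem (by omega : m < cs.length), hcm])))
          push_cast at this ⊢
          exact this
        rw [drop_eq_cons cs i h, qposL, if_pos hc, hhead, pairUp_cons_cons]
        rw [ih (cs.length - (j.toNat + 1)) (by omega) (j.toNat + 1) _ (by omega) rfl]
        simp [hcast]
    · rw [if_neg hc]
      rw [ih (cs.length - (i + 1)) (by omega) (i + 1) spans (by omega) rfl]
      rw [drop_eq_cons cs i h, qposL, if_neg hc]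
      push_cast; ring_nf
  · rw [dif_neg h]
    have : i = cs.length := by omega
    simp [this, qposL, pairUp_nil]

-- ===== VERDICT =====
theorem find_quoted_spans_spec : Claim_equal_find_quoted_spans := by
  intro text _
  unfold Spec_find_quoted_spans find_quoted_spans find_quoted_spans_alt
  rw [findQuotedLoop_eq text.toList 0 [] (Nat.zero_le _),
    enumerate_filter_eq_qposL]
  simp
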